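-- pv_equiv track=rewrite | github.com/trquoctoann/GraduationThesis.Chatbot | src/models/entities/entities_recognizer.py | reformat_customer_result
-- ===== SOURCE A (Python) =====
-- def reformat_customer_result(predicted_result):
--     aggregated_entities = {}
--     current_entity = None
--     current_label = None
--
--     for word, label in zip(predicted_result["words"], predicted_result["label"]):
--         if label.startswith("B-"):
--             if current_entity is not None and current_label is not None:
--                 if current_label in aggregated_entities:
--                     aggregated_entities[current_label].append(
--                         " ".join(current_entity)
--                     )
--                 else:
--                     aggregated_entities[current_label] = [" ".join(current_entity)]
--
--             current_entity = [word]
--             current_label = label[2:]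
--         elif (
--             label.startswith("I-")
--             and current_entity is not None
--             and label[2:] == current_label
--         ):
--             current_entity.append(word)
--         else:
--             if current_entity is not None and current_label is not None:
--                 if current_label in aggregated_entities:
--                     aggregated_entities[current_label].append(
--                         " ".join(current_entity)
--                     )
--                 else:
--                     aggregated_entities[current_label] = [" ".join(current_entity)]
--                 current_entity = None
--                 current_label = None
--             if label == "O":
--                 continue
--             else:
--                 aggregated_entities[label] = aggregated_entities.get(label, []) + [
--                     word
--                 ]
--
--     if current_entity is not None and current_label is not None:
--         if current_label in aggregated_entities:
--             aggregated_entities[current_label].append(" ".join(current_entity))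
--         else:
--             aggregated_entities[current_label] = [" ".join(current_entity)]
--
--     return aggregated_entities
-- ===== SOURCE B (Python) =====
-- def reformat_customer_result(predicted_result):
--     # Index-based span scanner: find each B- span and consume its whole I- run at
--     # once (nested while), instead of a running-buffer state machine with flushes.
--     words = predicted_result["words"]
--     labels = predicted_result["label"]
--     n = min(len(words), len(labels))
--     out = {}
--     i = 0
--     while i < n:
--         label = labels[i]
--         if label.startswith("B-"):
--             tag = label[2:]
--             j = i + 1
--             while j < n and labels[j] == "I-" + tag:
--                 j += 1
--             out.setdefault(tag, []).append(" ".join(words[i:j]))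
--             i = j
--         else:
--             if label != "O":
--                 out.setdefault(label, []).append(words[i])
--             i += 1
--     return out
-- ===== Notes on version B (the rewrite author's own statement) =====
-- stated objective: alternative
-- what changed: A is a running-buffer state machine that flushes a partial entity at three duplicated points; B is an index-based span scanner: an outer while finds each B- start, a nested while consumes the whole I- run at once, and the span's words are sliced and joined in one step (no buffer, no flush state), grouping into the dict via setdefault.
-- outside the precondition, e.g. on reformat_customer_result({'words': ['a']}): A raises KeyError, B raises KeyError
import Mathlib
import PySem

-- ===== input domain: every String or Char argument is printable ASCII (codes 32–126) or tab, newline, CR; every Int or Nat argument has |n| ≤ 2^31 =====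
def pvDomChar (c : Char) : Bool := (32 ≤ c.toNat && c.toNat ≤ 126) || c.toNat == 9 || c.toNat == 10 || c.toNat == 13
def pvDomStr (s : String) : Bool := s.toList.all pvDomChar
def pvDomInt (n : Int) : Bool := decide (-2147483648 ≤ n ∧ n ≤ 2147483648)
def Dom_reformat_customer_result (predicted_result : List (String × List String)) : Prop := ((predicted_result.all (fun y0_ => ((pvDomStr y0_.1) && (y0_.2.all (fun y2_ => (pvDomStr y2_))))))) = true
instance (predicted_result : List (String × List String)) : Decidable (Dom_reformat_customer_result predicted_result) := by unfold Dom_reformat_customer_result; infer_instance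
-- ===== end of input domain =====

-- B replaces A's running-buffer state machine (three duplicated flush blocks) by an
-- index-based span scanner: a nested loop consumes each B-…/I-… run in one step.
-- Objective: alternative algorithm, same cost.

-- ===== PORT A =====
-- the duplicated flush block of A: append the joined entity under current_label
def pvFlushA (d : PySem.Dict String (List String)) (ce : Option (List String)) (cl : Option String) :
    PySem.Dict String (List String) :=
  match ce, cl with
  | some e, some l =>
      if d.contains l then d.modify l [] (· ++ [PySem.Str.join " " e])
      else d.insert l [PySem.Str.join " " e]
  | _, _ => d

def pvStepA (st : PySem.Dict String (List String) × Option (List String) × Option String)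
    (p : String × String) : PySem.Dict String (List String) × Option (List String) × Option String :=
  match st, p with
  | (d, ce, cl), (word, label) =>
    if PySem.Str.startswith label "B-" then
      (pvFlushA d ce cl, some [word], some (PySem.Str.slice label (some 2) none))
    else if PySem.Str.startswith label "I-" && ce.isSome
        && (some (PySem.Str.slice label (some 2) none) == cl) then
      (d, ce.map (· ++ [word]), cl)
    else
      match ce, cl with
      | some e, some l =>
        if label = "O" then (pvFlushA d (some e) (some l), none, none)
        else
          let d' := pvFlushA d (some e) (some l)
          (d'.insert label (d'.getD label [] ++ [word]), none, none)
      | _, _ =>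
        if label = "O" then (d, ce, cl)
        else (d.insert label (d.getD label [] ++ [word]), ce, cl)

def reformat_customer_result (predicted_result : List (String × List String)) : List (String × List String) :=
  match predicted_result.lookup "words", predicted_result.lookup "label" with
  | some words, some labels =>
      let st := (words.zip labels).foldl pvStepA (PySem.Dict.empty, none, none)
      (pvFlushA st.1 st.2.1 st.2.2).items
  | _, _ => []   -- KeyError in Python; excluded by Pre_

-- ===== PORT B =====
-- B's inner while: consume the I-run of the current tag (words[i:j] and the new index j),
-- over the zipped (word, label) list (B reads both lists up to n = min of the lengths, as zip does)
def pvConsume (tag : String) : List (String × String) → List String × List (String × String)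
  | [] => ([], [])
  | (w, l) :: rest =>
    if l = "I-" ++ tag then
      let r := pvConsume tag rest
      (w :: r.1, r.2)
    else ([], (w, l) :: rest)

lemma pvConsume_len (tag : String) (ps : List (String × String)) :
    (pvConsume tag ps).2.length ≤ ps.length := by
  induction ps with
  | nil => simp [pvConsume]
  | cons p rest ih =>
    obtain ⟨w, l⟩ := p
    simp only [pvConsume]
    split
    · exact Nat.le_succ_of_le ih
    · simp

-- B's outer while, emitting the ordered (label, text) segment list
def pvScan : List (String × String) → List (String × String)
  | [] => []
  | (w, l) :: rest =>
    if PySem.Str.startswith l "B-" then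
      let tag := PySem.Str.slice l (some 2) none
      let r := pvConsume tag rest
      (tag, PySem.Str.join " " (w :: r.1)) :: pvScan r.2
    else if l = "O" then pvScan rest
    else (l, w) :: pvScan rest
termination_by ps => ps.length
decreasing_by
  · exact Nat.lt_succ_of_le (pvConsume_len _ rest)
  · simp
  · simp

def reformat_customer_result_alt (predicted_result : List (String × List String)) : List (String × List String) :=
  match predicted_result.lookup "words", predicted_result.lookup "label" with
  | some words, some labels =>
      -- out.setdefault(key, []).append(text)  ==  Dict.modify key [] (· ++ [text])
      ((pvScan (words.zip labels)).foldl
        (fun d p => d.modify p.1 [] (· ++ [p.2])) PySem.Dict.empty).items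
  | _, _ => []

-- ===== PRECONDITION & SPEC =====
-- Pre_ excludes only inputs missing the "words" or "label" key, where Python A raises KeyError.
def Pre_reformat_customer_result (predicted_result : List (String × List String)) : Prop :=
  (predicted_result.lookup "words").isSome = true ∧ (predicted_result.lookup "label").isSome = true
instance (predicted_result : List (String × List String)) : Decidable (Pre_reformat_customer_result predicted_result) := by unfold Pre_reformat_customer_result; infer_instance

def pvWitness_reformat_customer_result : (List (String × List String)) :=
  [("words", ["john", "doe", "x"]), ("label", ["B-name", "I-name", "O"])]

def Spec_reformat_customer_result (predicted_result : List (String × List String)) (out : List (String × List String)) : Prop := out = reformat_customer_result_alt predicted_result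
instance (predicted_result : List (String × List String)) (out : List (String × List String)) : Decidable (Spec_reformat_customer_result predicted_result out) := by unfold Spec_reformat_customer_result; infer_instance

-- ===== CLAIM =====
def Claim_equal_reformat_customer_result : Prop := ∀ (predicted_result : List (String × List String)), Dom_reformat_customer_result predicted_result → Pre_reformat_customer_result predicted_result → Spec_reformat_customer_result predicted_result (reformat_customer_result predicted_result)

-- ===== LEMMAS AND PROOFS =====

-- grouping fold of B, started from an arbitrary dict
def pvGroupFrom (d : PySem.Dict String (List String)) (segs : List (String × String)) :
    PySem.Dict String (List String) :=
  segs.foldl (fun d p => d.modify p.1 [] (· ++ [p.2])) d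

def pvFinishA (st : PySem.Dict String (List String) × Option (List String) × Option String) :
    PySem.Dict String (List String) :=
  pvFlushA st.1 st.2.1 st.2.2

-- segments B would emit starting with an active buffer (proof-side generalization of pvScan)
def pvSegsFrom : Option (String × List String) → List (String × String) → List (String × String)
  | none, ps => pvScan ps
  | some (tag, ws), ps =>
      (tag, PySem.Str.join " " (ws ++ (pvConsume tag ps).1)) :: pvScan (pvConsume tag ps).2

-- A's flush block is exactly one Dict.modify
lemma pvFlush_eq_modify (d : PySem.Dict String (List String)) (l j : String) :
    (if d.contains l then d.modify l [] (· ++ [j]) else d.insert l [j]) = d.modify l [] (· ++ [j]) := by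
  by_cases h : d.contains l = true
  · simp [h]
  · have h' : d.contains l = false := by simpa using h
    simp [h', PySem.Dict.modify, PySem.Dict.getD_of_not_contains d [] h']

lemma pvContIff (l tag : String) :
    (PySem.Str.startswith l "I-" && (some (PySem.Str.slice l (some 2) none) == some tag)) = true
      ↔ l = "I-" ++ tag := by
  rw [Bool.and_eq_true]
  constructor
  · rintro ⟨h1, h2⟩
    have hp : "I-".toList <+: l.toList := by
      rw [PySem.Str.startswith_eq] at h1
      exact (PySem.Chars.startswith_iff _ _).mp h1
    obtain ⟨t, ht⟩ := hp
    have h2' : PySem.Str.slice l (some 2) none = tag := by simpa using h2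
    have hslice : (PySem.Str.slice l (some 2) none).toList = l.toList.drop 2 := by
      rw [PySem.Str.toList_slice, PySem.Chars.slice_eq_listSlice]
      have := PySem.List.slice_from_natCast (xs := l.toList) (a := 2)
      simpa using this
    have htag : tag.toList = l.toList.drop 2 := by rw [← h2', hslice]
    exact String.toList_injective (by rw [← ht]; simp [htag, ← ht])
  · rintro rfl
    refine ⟨by rw [PySem.Str.startswith_eq, PySem.Chars.startswith_iff]; simp, ?_⟩
    have hslice : (PySem.Str.slice ("I-" ++ tag) (some 2) none).toList = ("I-" ++ tag).toList.drop 2 := by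
      rw [PySem.Str.toList_slice, PySem.Chars.slice_eq_listSlice]
      have := PySem.List.slice_from_natCast (xs := ("I-" ++ tag).toList) (a := 2)
      simpa using this
    have : (PySem.Str.slice ("I-" ++ tag) (some 2) none) = tag :=
      String.toList_injective (by rw [hslice]; simp)
    simp [this]

lemma pvB_not_Itag (l tag : String) (hB : PySem.Str.startswith l "B-" = true) :
    l ≠ "I-" ++ tag := by
  rintro rfl
  rw [PySem.Str.startswith_eq, PySem.Chars.startswith_iff] at hB
  simp [List.cons_prefix_cons] at hB

lemma pvScan_cons_B (w l : String) (rest : List (String × String))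
    (hB : PySem.Str.startswith l "B-" = true) :
    pvScan ((w, l) :: rest)
      = (PySem.Str.slice l (some 2) none,
         PySem.Str.join " " (w :: (pvConsume (PySem.Str.slice l (some 2) none) rest).1))
        :: pvScan (pvConsume (PySem.Str.slice l (some 2) none) rest).2 := by
  rw [pvScan.eq_def]; simp only [hB, if_true]

lemma pvScan_cons_O (w l : String) (rest : List (String × String))
    (hBf : PySem.Str.startswith l "B-" = false) (hO : l = "O") :
    pvScan ((w, l) :: rest) = pvScan rest := by
  subst hO
  rw [pvScan.eq_def]
  simp only [show (PySem.Str.startswith "O" "B-") = false from by decide, Bool.false_eq_true,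
    if_false, if_true]

lemma pvScan_cons_other (w l : String) (rest : List (String × String))
    (hBf : PySem.Str.startswith l "B-" = false) (hO : l ≠ "O") :
    pvScan ((w, l) :: rest) = (l, w) :: pvScan rest := by
  rw [pvScan.eq_def]; simp only [hBf, Bool.false_eq_true, if_false, if_neg hO]

lemma pvMain (ps : List (String × String)) :
    ∀ (d : PySem.Dict String (List String)) (buf : Option (String × List String)),
    pvFinishA (ps.foldl pvStepA (d, buf.map Prod.snd, buf.map Prod.fst))
      = pvGroupFrom d (pvSegsFrom buf ps) := by
  induction ps with
  | nil =>
    intro d buf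
    cases buf with
    | none => simp [pvFinishA, pvFlushA, pvGroupFrom, pvSegsFrom, pvScan]
    | some b =>
      obtain ⟨tag, ws⟩ := b
      simp only [pvFinishA, pvSegsFrom, pvGroupFrom, pvFlushA, pvConsume, Option.map_some,
        List.foldl_nil, List.foldl_cons, List.append_nil, pvScan]
      exact pvFlush_eq_modify d tag (PySem.Str.join " " ws)
  | cons p rest ih =>
    intro d buf
    obtain ⟨w, l⟩ := p
    simp only [List.foldl_cons]
    cases buf with
    | none =>
      simp only [Option.map_none]
      by_cases hB : PySem.Str.startswith l "B-" = true
      · have e1 : pvStepA (d, none, none) (w, l)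
            = (d, some [w], some (PySem.Str.slice l (some 2) none)) := by
          simp only [pvStepA]; rw [hB]; simp [pvFlushA]
        rw [e1]
        have := ih d (some (PySem.Str.slice l (some 2) none, [w]))
        simp only [Option.map_some] at this
        rw [this]
        simp only [pvSegsFrom]
        rw [pvScan_cons_B w l rest hB]
        simp
      · have hBf : PySem.Str.startswith l "B-" = false := by simpa using hB
        by_cases hO : l = "O"
        · have e1 : pvStepA (d, none, none) (w, l) = (d, none, none) := by
            simp only [pvStepA]; rw [hBf]; simp [hO]
          rw [e1]
          have := ih d none
          simp only [Option.map_none] at this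
          rw [this]
          simp only [pvSegsFrom]
          rw [pvScan_cons_O w l rest hBf hO]
        · have e1 : pvStepA (d, none, none) (w, l)
              = (d.insert l (d.getD l [] ++ [w]), none, none) := by
            simp only [pvStepA]; rw [hBf]; simp [hO]
          rw [e1]
          have := ih (d.insert l (d.getD l [] ++ [w])) none
          simp only [Option.map_none] at this
          rw [this]
          simp only [pvSegsFrom]
          rw [pvScan_cons_other w l rest hBf hO]
          simp only [pvGroupFrom, List.foldl_cons]
          rfl
    | some b =>
      obtain ⟨tag, ws⟩ := b
      simp only [Option.map_some]
      by_cases hC : l = "I-" ++ tag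
      · have hBf : PySem.Str.startswith l "B-" = false := by
          by_contra h
          exact pvB_not_Itag l tag (by simpa using h) hC
        have hIt : (PySem.Str.startswith l "I-"
            && (some (PySem.Str.slice l (some 2) none) == some tag)) = true :=
          (pvContIff l tag).mpr hC
        have e1 : pvStepA (d, some ws, some tag) (w, l) = (d, some (ws ++ [w]), some tag) := by
          simp only [pvStepA]; rw [hBf]
          simp only [Bool.false_eq_true, if_false]
          rw [show (PySem.Str.startswith l "I-" && (some ws).isSome
              && (some (PySem.Str.slice l (some 2) none) == some tag)) = true by
            rw [Bool.and_eq_true] at hIt ⊢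
            exact ⟨by rw [Bool.and_eq_true]; exact ⟨hIt.1, rfl⟩, hIt.2⟩]
          simp
        rw [e1]
        have := ih d (some (tag, ws ++ [w]))
        simp only [Option.map_some] at this
        rw [this]
        simp only [pvSegsFrom, pvConsume, hC, if_pos trivial]
        simp
      · -- buffer breaks
        have hIf : (PySem.Str.startswith l "I-"
            && (some (PySem.Str.slice l (some 2) none) == some tag)) = false := by
          by_contra h
          exact hC ((pvContIff l tag).mp (by simpa using h))
        have hcons : pvConsume tag ((w, l) :: rest) = ([], (w, l) :: rest) := by
          simp [pvConsume, hC]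
        have hseg : pvSegsFrom (some (tag, ws)) ((w, l) :: rest)
            = (tag, PySem.Str.join " " ws) :: pvScan ((w, l) :: rest) := by
          simp [pvSegsFrom, hcons]
        have hflush : pvFlushA d (some ws) (some tag)
            = pvGroupFrom d [(tag, PySem.Str.join " " ws)] := by
          simp only [pvFlushA, pvGroupFrom, List.foldl_cons, List.foldl_nil]
          exact pvFlush_eq_modify d tag (PySem.Str.join " " ws)
        have hgroup : ∀ segs, pvGroupFrom d ((tag, PySem.Str.join " " ws) :: segs)
            = pvGroupFrom (pvFlushA d (some ws) (some tag)) segs := by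
          intro segs
          simp only [pvGroupFrom, List.foldl_cons, hflush]
          rfl
        rw [hseg, hgroup]
        by_cases hB : PySem.Str.startswith l "B-" = true
        · have e1 : pvStepA (d, some ws, some tag) (w, l)
              = (pvFlushA d (some ws) (some tag), some [w],
                 some (PySem.Str.slice l (some 2) none)) := by
            simp only [pvStepA]; rw [hB]; simp
          rw [e1]
          have := ih (pvFlushA d (some ws) (some tag))
            (some (PySem.Str.slice l (some 2) none, [w]))
          simp only [Option.map_some] at this
          rw [this]
          simp only [pvSegsFrom]
          rw [pvScan_cons_B w l rest hB]
          simp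
        · have hBf : PySem.Str.startswith l "B-" = false := by simpa using hB
          by_cases hO : l = "O"
          · have e1 : pvStepA (d, some ws, some tag) (w, l)
                = (pvFlushA d (some ws) (some tag), none, none) := by
              simp only [pvStepA]; rw [hBf]
              simp only [Bool.false_eq_true, if_false]
              rw [show (PySem.Str.startswith l "I-" && (some ws).isSome
                  && (some (PySem.Str.slice l (some 2) none) == some tag)) = false by
                rw [Bool.and_eq_false_iff] at hIf ⊢
                rcases hIf with h | h
                · exact Or.inl (by rw [Bool.and_eq_false_iff]; exact Or.inl h)
                · exact Or.inr h]
              simp [hO]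
            rw [e1]
            have := ih (pvFlushA d (some ws) (some tag)) none
            simp only [Option.map_none] at this
            rw [this]
            simp only [pvSegsFrom]
            rw [pvScan_cons_O w l rest hBf hO]
          · have e1 : pvStepA (d, some ws, some tag) (w, l)
                = ((pvFlushA d (some ws) (some tag)).insert l
                    ((pvFlushA d (some ws) (some tag)).getD l [] ++ [w]), none, none) := by
              simp only [pvStepA]; rw [hBf]
              simp only [Bool.false_eq_true, if_false]
              rw [show (PySem.Str.startswith l "I-" && (some ws).isSome
                  && (some (PySem.Str.slice l (some 2) none) == some tag)) = false by
                rw [Bool.and_eq_false_iff] at hIf ⊢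
                rcases hIf with h | h
                · exact Or.inl (by rw [Bool.and_eq_false_iff]; exact Or.inl h)
                · exact Or.inr h]
              simp [hO]
            rw [e1]
            have := ih ((pvFlushA d (some ws) (some tag)).insert l
              ((pvFlushA d (some ws) (some tag)).getD l [] ++ [w])) none
            simp only [Option.map_none] at this
            rw [this]
            simp only [pvSegsFrom]
            rw [pvScan_cons_other w l rest hBf hO]
            simp only [pvGroupFrom, List.foldl_cons]
            rfl

-- ===== VERDICT =====
theorem reformat_customer_result_spec : Claim_equal_reformat_customer_result := by
  intro pr _ hpre
  obtain ⟨h1, h2⟩ := hpre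
  rcases hw : pr.lookup "words" with _ | words
  · rw [hw] at h1; simp at h1
  · rcases hl : pr.lookup "label" with _ | labels
    · rw [hl] at h2; simp at h2
    · unfold Spec_reformat_customer_result reformat_customer_result reformat_customer_result_alt
      rw [hw, hl]
      simp only
      have := pvMain (words.zip labels) PySem.Dict.empty none
      simp only [Option.map_none, pvFinishA, pvGroupFrom, pvSegsFrom] at this
      rw [this]
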